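-- pv_equiv track=rewrite | github.com/SonyCSLParis/Plant3DImager | Plant3DImager/targeting/modules/robot_controller (Copie).py | _segment_path_by_actions
-- ===== SOURCE A (Python) =====
-- def _segment_path_by_actions(path):
--     """Segment trajectory by action points (photo/fluoro)"""
--     segments = []
--     action_indices = []
--
--     # Find action indices
--     for i, point_info in enumerate(path):
--         if point_info["type"] in ["photo_point", "fluoro_point", "return_photo_point"]:
--             action_indices.append(i)
--
--     if not action_indices:
--         return [path]
--
--     # Create segments
--     start_idx = 0
--
--     for action_idx in action_indices:
--         # Segment from start to action (inclusive)
--         segment = path[start_idx:action_idx + 1]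
--         segments.append(segment)
--         start_idx = action_idx
--
--     # Final segment from last action to end
--     if start_idx < len(path) - 1:
--         final_segment = path[start_idx:]
--         segments.append(final_segment)
--
--     return segments
-- ===== SOURCE B (Python) =====
-- def _segment_path_by_actions(path):
--     """Single pass: grow the current segment; cut at each action point, carrying it over."""
--     result = []
--     current = []
--     for point in path:
--         current.append(point)
--         if point["type"] in ("photo_point", "fluoro_point", "return_photo_point"):
--             result.append(current)
--             current = [point]
--     if not result:
--         return [path]
--     if len(current) > 1:
--         result.append(current)
--     return result
-- ===== Notes on version B (the rewrite author's own statement) =====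
-- stated objective: simpler
-- what changed: B builds segments in one pass over the path with a running current segment cut at each action point, instead of first collecting action indices and then slicing the path per index.
import Mathlib
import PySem

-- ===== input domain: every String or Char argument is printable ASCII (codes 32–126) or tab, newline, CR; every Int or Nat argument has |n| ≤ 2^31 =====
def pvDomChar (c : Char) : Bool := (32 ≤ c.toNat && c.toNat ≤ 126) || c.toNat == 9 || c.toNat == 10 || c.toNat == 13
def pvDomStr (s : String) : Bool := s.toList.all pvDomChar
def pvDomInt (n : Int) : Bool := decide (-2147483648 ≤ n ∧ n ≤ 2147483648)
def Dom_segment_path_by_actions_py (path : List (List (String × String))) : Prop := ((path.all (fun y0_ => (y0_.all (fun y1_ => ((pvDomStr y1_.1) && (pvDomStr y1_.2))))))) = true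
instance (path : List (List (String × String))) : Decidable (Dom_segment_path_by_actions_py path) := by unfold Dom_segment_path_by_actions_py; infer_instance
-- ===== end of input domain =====

-- B builds segments in one pass with a running current segment cut at each action point,
-- instead of collecting action indices and slicing; same cost, simpler.

-- point["type"] on the association-list dict: first value with key "type" (KeyError = none, excluded by Pre_)
def pvTypeOf (pt : List (String × String)) : String :=
  ((pt.find? (fun kv => kv.1 == "type")).map (·.2)).getD ""

def pvIsAction (pt : List (String × String)) : Bool :=
  decide (pvTypeOf pt ∈ ["photo_point", "fluoro_point", "return_photo_point"])

-- ===== PORT A =====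
def segment_path_by_actions_py (path : List (List (String × String))) : List (List (List (String × String))) :=
  -- for i, point_info in enumerate(path): if point_info["type"] in [...]: action_indices.append(i)
  let action_indices : List Int :=
    (PySem.List.enumerate path 0).foldl
      (fun acc p => if pvIsAction p.2 then acc ++ [p.1] else acc) []
  if action_indices = [] then [path]
  else
    -- for action_idx in action_indices: segments.append(path[start_idx:action_idx+1]); start_idx = action_idx
    let st := action_indices.foldl
      (fun (st : List (List (List (String × String))) × Int) a =>
        (st.1 ++ [PySem.List.slice path (some st.2) (some (a + 1))], a))
      ([], 0)
    -- if start_idx < len(path) - 1: segments.append(path[start_idx:])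
    if st.2 < (path.length : Int) - 1 then st.1 ++ [PySem.List.slice path (some st.2) none]
    else st.1

-- ===== PORT B =====
def segment_path_by_actions_py_alt (path : List (List (String × String))) : List (List (List (String × String))) :=
  -- for point in path: current.append(point); if action: result.append(current); current = [point]
  let st := path.foldl
    (fun (st : List (List (List (String × String))) × List (List (String × String))) p =>
      let cur := st.2 ++ [p]
      if pvIsAction p then (st.1 ++ [cur], [p]) else (st.1, cur))
    ([], [])
  if st.1 = [] then [path]
  else if st.2.length > 1 then st.1 ++ [st.2]
  else st.1

-- ===== PRECONDITION & SPEC =====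
-- Pre_ excludes exactly the inputs where Python raises KeyError: some point has no "type" key.
def Pre_segment_path_by_actions_py (path : List (List (String × String))) : Prop :=
  (path.all (fun pt => pt.any (fun kv => kv.1 == "type"))) = true
instance (path : List (List (String × String))) : Decidable (Pre_segment_path_by_actions_py path) := by unfold Pre_segment_path_by_actions_py; infer_instance

def pvWitness_segment_path_by_actions_py : (List (List (String × String))) :=
  [[("type", "move")], [("type", "photo_point")], [("type", "move")]]

def Spec_segment_path_by_actions_py (path : List (List (String × String))) (out : List (List (List (String × String)))) : Prop := out = segment_path_by_actions_py_alt path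
instance (path : List (List (String × String))) (out : List (List (List (String × String)))) : Decidable (Spec_segment_path_by_actions_py path out) := by unfold Spec_segment_path_by_actions_py; infer_instance

-- ===== CLAIM (what is proved, stated in full; the proofs are below) =====
def Claim_equal_segment_path_by_actions_py : Prop := ∀ (path : List (List (String × String))), Dom_segment_path_by_actions_py path → Pre_segment_path_by_actions_py path → Spec_segment_path_by_actions_py path (segment_path_by_actions_py path)

-- ===== LEMMAS AND PROOFS =====

-- action indices of the suffix starting at position n, as naturals
def pvActs (l : List (List (String × String))) (n : Nat) : List Nat :=
  match l with
  | [] => []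
  | p :: l' => if pvIsAction p then n :: pvActs l' (n + 1) else pvActs l' (n + 1)

-- A's segment list from start s and action index list
def pvSegsOf (P : List (List (String × String))) (s : Nat) : List Nat → List (List (List (String × String)))
  | [] => []
  | a :: r => (P.drop s).take (a + 1 - s) :: pvSegsOf P a r

def pvLastA (s : Nat) : List Nat → Nat
  | [] => s
  | a :: r => pvLastA a r

-- B's loop as structural recursion
def pvGo (cur : List (List (String × String))) :
    List (List (String × String)) → List (List (List (String × String))) × List (List (String × String))
  | [] => ([], cur)
  | p :: l => if pvIsAction p then ((cur ++ [p]) :: (pvGo [p] l).1, (pvGo [p] l).2)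
              else pvGo (cur ++ [p]) l

lemma pvActsEnum (l : List (List (String × String))) (n : Nat) (acc : List Int) :
    (PySem.List.enumerate l (n : Int)).foldl
      (fun acc p => if pvIsAction p.2 then acc ++ [p.1] else acc) acc
    = acc ++ (pvActs l n).map (Nat.cast : Nat → Int) := by
  induction l generalizing n acc with
  | nil => simp [PySem.List.enumerate_nil, pvActs]
  | cons p l ih =>
    rw [PySem.List.enumerate_cons]
    have hcast : ((n : Int) + 1) = ((n + 1 : Nat) : Int) := by push_cast; ring
    simp only [List.foldl_cons, hcast, ih]
    by_cases h : pvIsAction p <;> simp [h, pvActs]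

lemma pvFoldA (P : List (List (String × String))) (acts : List Nat) (segs : List (List (List (String × String)))) (s : Nat) :
    (acts.map (Nat.cast : Nat → Int)).foldl
      (fun (st : List (List (List (String × String))) × Int) a =>
        (st.1 ++ [PySem.List.slice P (some st.2) (some (a + 1))], a))
      (segs, (s : Int))
    = (segs ++ pvSegsOf P s acts, ((pvLastA s acts : Nat) : Int)) := by
  induction acts generalizing segs s with
  | nil => simp [pvSegsOf, pvLastA]
  | cons a r ih =>
    simp only [List.map_cons, List.foldl_cons, pvSegsOf, pvLastA]
    have h1 : ((a : Int) + 1) = ((a + 1 : Nat) : Int) := by push_cast; ring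
    rw [h1, PySem.List.slice_natCast, ih]
    simp

lemma pvFoldB (l : List (List (String × String))) (res : List (List (List (String × String)))) (cur : List (List (String × String))) :
    l.foldl
      (fun (st : List (List (List (String × String))) × List (List (String × String))) p =>
        let cur := st.2 ++ [p]
        if pvIsAction p then (st.1 ++ [cur], [p]) else (st.1, cur))
      (res, cur)
    = (res ++ (pvGo cur l).1, (pvGo cur l).2) := by
  induction l generalizing res cur with
  | nil => simp [pvGo]
  | cons p l ih =>
    simp only [List.foldl_cons, pvGo]
    by_cases h : pvIsAction p
    · simp [h, ih]
    · simp [h, ih]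

lemma pvGoMain (P : List (List (String × String))) (l : List (List (String × String))) (n s : Nat)
    (hl : l = P.drop n) (hs : s ≤ n) :
    pvGo ((P.take n).drop s) l = (pvSegsOf P s (pvActs l n), P.drop (pvLastA s (pvActs l n))) := by
  induction l generalizing n s with
  | nil =>
    have hn : P.length ≤ n := by
      have := List.drop_eq_nil_iff.mp hl.symm
      omega
    simp [pvGo, pvActs, pvSegsOf, pvLastA, List.take_of_length_le hn]
  | cons p l' ih =>
    have hn : n < P.length := by
      by_contra h
      have : P.drop n = [] := List.drop_eq_nil_iff.mpr (by omega)
      rw [this] at hl; exact absurd hl (by simp)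
    have hdec : P.drop n = P[n] :: P.drop (n + 1) := List.drop_eq_getElem_cons hn
    have h2 : P[n] :: P.drop (n + 1) = p :: l' := hdec.symm.trans hl.symm
    have hp : P[n] = p := (List.cons.injEq _ _ _ _ ▸ h2).1
    have hl' : l' = P.drop (n + 1) := ((List.cons.injEq _ _ _ _ ▸ h2).2).symm
    have hcur : ∀ t, t ≤ n → (P.take n).drop t ++ [p] = (P.take (n + 1)).drop t := by
      intro t ht
      have hlen : t ≤ (P.take n).length := by
        simp [List.length_take]
        omega
      rw [List.take_add_one, List.getElem?_eq_getElem hn, hp]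
      simp only [Option.toList_some]
      rw [List.drop_append_of_le_length hlen]
    simp only [pvGo, pvActs]
    by_cases h : pvIsAction p
    · simp only [h, if_true]
      have hsing : [p] = (P.take (n + 1)).drop n := by
        rw [← hcur n (le_refl n)]
        simp
      rw [hcur s hs, hsing, ih (n + 1) n hl' (by omega)]
      simp only [pvSegsOf, pvLastA, List.drop_take]
    · simp only [h, Bool.false_eq_true, if_false]
      rw [hcur s hs, ih (n + 1) s hl' (by omega)]

lemma pvSegsOf_ne_nil (P : List (List (String × String))) (s a : Nat) (r : List Nat) :
    pvSegsOf P s (a :: r) ≠ [] := by simp [pvSegsOf]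

-- ===== VERDICT (by name: the statement is the Claim_ definition above) =====
theorem segment_path_by_actions_py_spec : Claim_equal_segment_path_by_actions_py := by
  intro path _ _
  unfold Spec_segment_path_by_actions_py
  simp only [segment_path_by_actions_py, segment_path_by_actions_py_alt]
  have hA := pvActsEnum path 0 []
  have hB := pvFoldB path [] []
  have hmain := pvGoMain path path 0 0 (by simp) (le_refl 0)
  simp only [List.nil_append] at hA hB
  simp only [Nat.cast_zero] at hA
  rw [hA, hB]
  have hgo : pvGo [] path = (pvSegsOf path 0 (pvActs path 0), path.drop (pvLastA 0 (pvActs path 0))) := by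
    simpa using hmain
  rw [hgo]
  cases hacts : pvActs path 0 with
  | nil =>
    simp [pvSegsOf]
  | cons a r =>
    have hne : (a :: r).map (Nat.cast : Nat → Int) ≠ [] := by simp
    simp only [hacts, hne, if_neg hne]
    have hfold := pvFoldA path (a :: r) [] 0
    simp only [Nat.cast_zero, List.nil_append] at hfold
    rw [hfold]
    simp only [pvSegsOf_ne_nil, if_neg (pvSegsOf_ne_nil path 0 a r)]
    set m := pvLastA 0 (a :: r) with hm
    have hlen : (path.drop m).length = path.length - m := by simp
    by_cases hcond : (m : Int) < (path.length : Int) - 1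
    · have hlt : m + 1 < path.length := by omega
      have : (path.drop m).length > 1 := by omega
      rw [if_pos hcond, if_pos this, PySem.List.slice_from_natCast]
    · have hge : ¬ (m + 1 < path.length) := by omega
      have : ¬ ((path.drop m).length > 1) := by omega
      rw [if_neg hcond, if_neg this]
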